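-- pv_equiv track=rewrite | github.com/MrGuo2/MyProject | sequence_predict/mixnet/src/features/feature_utils.py | build_index_by_count
-- ===== SOURCE A (Python) =====
-- def build_index_by_count(count_dict, min_count, offset=0):
--     sorted_items = sorted(count_dict.items(), key=lambda vv: vv[1]['count'], reverse=True)
--     sorted_dict = {}
--     for i, (k, v) in enumerate(sorted_items):
--         v = {'index': i + offset, **v}
--         if v['count'] < min_count:
--             break
--         sorted_dict[k] = v
--     return sorted_dict
-- ===== SOURCE B (Python) =====
-- def build_index_by_count(count_dict, min_count, offset=0):
--     buckets = {}
--     for k, v in count_dict.items():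
--         buckets[v['count']] = buckets.get(v['count'], []) + [(k, v)]
--     result = {}
--     i = offset
--     for c in sorted(buckets, reverse=True):
--         if c < min_count:
--             break
--         for k, v in buckets[c]:
--             result[k] = {'index': i, **v}
--             i += 1
--     return result
-- ===== Notes on version B (the rewrite author's own statement) =====
-- stated objective: alternative
-- what changed: B replaces A's sort-all-items-then-break loop by a bucket (counting-sort style) strategy: it groups entries into a dict keyed by their count value, sorts only the distinct count values descending, and emits buckets in that order with a running index counter, breaking below min_count; insertion order inside a bucket reproduces the stable sort's tie order.
import Mathlib
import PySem

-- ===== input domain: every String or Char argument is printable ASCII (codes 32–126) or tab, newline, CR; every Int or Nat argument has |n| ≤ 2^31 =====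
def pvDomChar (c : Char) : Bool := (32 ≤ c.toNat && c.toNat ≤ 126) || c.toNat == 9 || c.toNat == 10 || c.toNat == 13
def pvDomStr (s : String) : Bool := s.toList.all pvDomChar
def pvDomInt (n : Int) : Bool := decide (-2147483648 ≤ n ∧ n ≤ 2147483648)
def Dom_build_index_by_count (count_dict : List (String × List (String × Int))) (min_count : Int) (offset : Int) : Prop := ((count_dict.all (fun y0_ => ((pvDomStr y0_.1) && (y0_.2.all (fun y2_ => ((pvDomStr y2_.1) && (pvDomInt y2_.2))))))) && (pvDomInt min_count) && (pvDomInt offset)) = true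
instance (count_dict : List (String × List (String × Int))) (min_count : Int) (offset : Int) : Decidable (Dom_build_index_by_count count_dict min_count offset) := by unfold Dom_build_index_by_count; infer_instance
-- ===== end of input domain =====

-- B replaces A's sort-all-items-then-break loop by a bucket strategy: group entries by their count value,
-- sort only the distinct counts descending, and emit buckets with a running index; objective: alternative.

-- shared helpers: both Pythons write v['count'] and the {'index': …, **v} display verbatim
-- v['count']: the 'count' key exists under Pre_, so getD 0 is exact there (KeyError is excluded by Pre_)
def pvCount (v : List (String × Int)) : Int := (PySem.Dict.ofList v).getD "count" 0

-- {'index': idx, **v}: dict display, 'index' inserted first, then v's items in order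
def pvMerge (idx : Int) (v : List (String × Int)) : PySem.Dict String Int :=
  v.foldl (fun d p => d.insert p.1 p.2) ((PySem.Dict.empty).insert "index" idx)

-- ===== PORT A =====
-- A's 'for i,(k,v) in enumerate(sorted_items): … if …: break; sorted_dict[k]=v' loop
def pvALoop (min_count offset : Int) (d : PySem.Dict String (List (String × Int))) :
    List (Int × (String × List (String × Int))) → PySem.Dict String (List (String × Int))
  | [] => d
  | (i, (k, v)) :: rest =>
      let v' := pvMerge (i + offset) v
      if v'.getD "count" 0 < min_count then d
      else pvALoop min_count offset (d.insert k v'.items) rest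

def build_index_by_count (count_dict : List (String × List (String × Int))) (min_count : Int) (offset : Int) : List (String × List (String × Int)) :=
  -- count_dict is a Python dict: normalise the assoc-list encoding as dict construction does (first position, last value wins); .items() then iterates it
  let items := (PySem.Dict.ofList count_dict).items
  let sorted_items := PySem.List.sorted items (fun vv => pvCount vv.2) true
  (pvALoop min_count offset PySem.Dict.empty (PySem.List.enumerate sorted_items 0)).items

-- ===== PORT B =====
-- inner loop body: result[k] = {'index': i, **v}; i += 1
def pvBStep (st : PySem.Dict String (List (String × Int)) × Int) (kv : String × List (String × Int)) :
    PySem.Dict String (List (String × Int)) × Int :=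
  (st.1.insert kv.1 (pvMerge st.2 kv.2).items, st.2 + 1)

-- outer 'for c in sorted(buckets, reverse=True): if c < min_count: break; for k, v in buckets[c]: …'
def pvBLoop (min_count : Int) (buckets : PySem.Dict Int (List (String × List (String × Int))))
    (d : PySem.Dict String (List (String × Int))) (i : Int) :
    List Int → PySem.Dict String (List (String × Int))
  | [] => d
  | c :: rest =>
      if c < min_count then d
      else
        let st := (buckets.getD c []).foldl pvBStep (d, i)
        pvBLoop min_count buckets st.1 st.2 rest

def build_index_by_count_alt (count_dict : List (String × List (String × Int))) (min_count : Int) (offset : Int) : List (String × List (String × Int)) :=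
  let items := (PySem.Dict.ofList count_dict).items
  -- buckets[v['count']] = buckets.get(v['count'], []) + [(k, v)]
  let buckets := items.foldl (fun b kv => b.modify (pvCount kv.2) [] (fun l => l ++ [kv])) PySem.Dict.empty
  -- sorted(buckets, reverse=True): the distinct count values, descending
  let counts := PySem.List.sorted buckets.keys (fun c => c) true
  (pvBLoop min_count buckets PySem.Dict.empty offset counts).items

-- ===== PRECONDITION & SPEC =====
-- Pre_ excludes exactly the inputs where Python A raises KeyError: some value of the dict lacks the 'count' key
def Pre_build_index_by_count (count_dict : List (String × List (String × Int))) (min_count : Int) (offset : Int) : Prop :=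
  ∀ kv ∈ (PySem.Dict.ofList count_dict).items, (PySem.Dict.ofList kv.2).contains "count" = true
instance (count_dict : List (String × List (String × Int))) (min_count : Int) (offset : Int) : Decidable (Pre_build_index_by_count count_dict min_count offset) := by unfold Pre_build_index_by_count; infer_instance

def pvWitness_build_index_by_count : (List (String × List (String × Int))) × Int × Int :=
  ([("a", [("count", 3)]), ("b", [("count", 1)])], 2, 5)

def Spec_build_index_by_count (count_dict : List (String × List (String × Int))) (min_count : Int) (offset : Int) (out : List (String × List (String × Int))) : Prop := out = build_index_by_count_alt count_dict min_count offset
instance (count_dict : List (String × List (String × Int))) (min_count : Int) (offset : Int) (out : List (String × List (String × Int))) : Decidable (Spec_build_index_by_count count_dict min_count offset out) := by unfold Spec_build_index_by_count; infer_instance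

-- ===== CLAIM (what is proved, stated in full; the proofs are below) =====
def Claim_equal_build_index_by_count : Prop := ∀ (count_dict : List (String × List (String × Int))) (min_count : Int) (offset : Int), Dom_build_index_by_count count_dict min_count offset → Pre_build_index_by_count count_dict min_count offset → Spec_build_index_by_count count_dict min_count offset (build_index_by_count count_dict min_count offset)

-- ===== LEMMAS AND PROOFS =====

theorem pvWitness_ok : Dom_build_index_by_count (pvWitness_build_index_by_count.1) (pvWitness_build_index_by_count.2.1) (pvWitness_build_index_by_count.2.2) ∧ Pre_build_index_by_count (pvWitness_build_index_by_count.1) (pvWitness_build_index_by_count.2.1) (pvWitness_build_index_by_count.2.2) := by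
  constructor <;> decide

-- the lookup of one key through a fold of inserts only depends on that key's prior binding
theorem foldl_insert_get?_congr (v : List (String × Int)) (k : String) (d0 d1 : PySem.Dict String Int)
    (h : d0.get? k = d1.get? k) :
    (v.foldl (fun d p => d.insert p.1 p.2) d0).get? k = (v.foldl (fun d p => d.insert p.1 p.2) d1).get? k := by
  induction v generalizing d0 d1 with
  | nil => exact h
  | cons p t ih =>
      refine ih _ _ ?_
      rw [PySem.Dict.get?_insert, PySem.Dict.get?_insert]
      split <;> simp [h]

-- the merged dict's 'count' is the original 'count' ('index' ≠ 'count')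
theorem pvMerge_count (idx : Int) (v : List (String × Int)) :
    (pvMerge idx v).getD "count" 0 = pvCount v := by
  unfold pvMerge pvCount
  rw [PySem.Dict.getD_eq_get?_getD, PySem.Dict.getD_eq_get?_getD]
  have h : ((PySem.Dict.empty : PySem.Dict String Int).insert "index" idx).get? "count"
      = (PySem.Dict.empty : PySem.Dict String Int).get? "count" :=
    PySem.Dict.get?_insert_of_ne _ _ (by decide)
  rw [foldl_insert_get?_congr v "count" _ _ h]
  simp [PySem.Dict.ofList, PySem.Dict.update]

theorem insertBy_all_lt {α : Type} (key : α → Int) (x : α) (l : List α)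
    (h : ∀ y ∈ l, key y < key x) :
    PySem.List.insertBy (fun a b => decide (key b < key a)) x l = x :: l := by
  cases l with
  | nil => rfl
  | cons a t => simp [PySem.List.insertBy, h a (by simp)]

theorem filter_insertBy {α : Type} (key : α → Int) (p : α → Bool) (x : α) (acc : List α)
    (h : acc.Pairwise (fun a b => key b ≤ key a)) :
    (PySem.List.insertBy (fun a b => decide (key b < key a)) x acc).filter p
      = if p x then PySem.List.insertBy (fun a b => decide (key b < key a)) x (acc.filter p) else acc.filter p := by
  induction acc with
  | nil => by_cases hp : p x <;> simp [PySem.List.insertBy, hp]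
  | cons a t ih =>
      rcases List.pairwise_cons.mp h with ⟨ha, ht⟩
      by_cases hlt : key a < key x
      · rw [show PySem.List.insertBy (fun a b => decide (key b < key a)) x (a :: t) = x :: a :: t by
          simp [PySem.List.insertBy, hlt]]
        by_cases hp : p x
        · by_cases hpa : p a
          · simp [hp, hpa, PySem.List.insertBy, hlt]
          · have hall : ∀ y ∈ t.filter p, key y < key x := by
              intro y hy
              have h2 : key y ≤ key a := ha y (List.mem_of_mem_filter hy)
              omega
            simp [hp, hpa, insertBy_all_lt key x (t.filter p) hall]
        · simp [List.filter_cons, hp]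
      · rw [show PySem.List.insertBy (fun a b => decide (key b < key a)) x (a :: t) = a :: PySem.List.insertBy (fun a b => decide (key b < key a)) x t by
          simp [PySem.List.insertBy, hlt]]
        by_cases hp : p x
        · by_cases hpa : p a
          · simp only [List.filter_cons, hpa, hp, if_true]
            rw [show PySem.List.insertBy (fun a b => decide (key b < key a)) x (a :: t.filter p) = a :: PySem.List.insertBy (fun a b => decide (key b < key a)) x (t.filter p) from by
              simp [PySem.List.insertBy, hlt]]
            rw [ih ht]
            simp [hp]
          · simp [hpa, ih ht, hp]
        · simp [List.filter_cons, ih ht, hp]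

theorem sorted_rev_append_singleton {α : Type} (key : α → Int) (xs : List α) (x : α) :
    PySem.List.sorted (xs ++ [x]) key true
      = PySem.List.insertBy (fun a b => decide (key b < key a)) x (PySem.List.sorted xs key true) := by
  rw [PySem.List.sorted_rev_eq_foldl_insertBy, PySem.List.sorted_rev_eq_foldl_insertBy, List.foldl_append]
  rfl

-- a stable sort commutes with filtering
theorem sorted_filter_comm {α : Type} (key : α → Int) (p : α → Bool) (xs : List α) :
    (PySem.List.sorted xs key true).filter p = PySem.List.sorted (xs.filter p) key true := by
  induction xs using List.reverseRecOn with
  | nil => simp [(PySem.List.sorted_eq_nil_iff ([] : List α) key true).mpr rfl]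
  | append_singleton xs x ih =>
      rw [sorted_rev_append_singleton,
        filter_insertBy key p x _ (PySem.List.sorted_pairwise_rev xs key), ih, List.filter_append]
      by_cases hp : p x
      · simp only [hp, if_true, List.filter_cons, List.filter_nil]
        rw [sorted_rev_append_singleton]
      · simp [hp]

-- on a descending list, cutting at the first sub-threshold element is filtering
theorem takeWhile_eq_filter_of_desc {α : Type} (key : α → Int) (mc : Int) (l : List α)
    (h : l.Pairwise (fun a b => key b ≤ key a)) :
    l.takeWhile (fun x => decide (mc ≤ key x)) = l.filter (fun x => decide (mc ≤ key x)) := by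
  induction l with
  | nil => rfl
  | cons a t ih =>
      rcases List.pairwise_cons.mp h with ⟨ha, ht⟩
      by_cases hq : mc ≤ key a
      · simp only [List.takeWhile_cons, List.filter_cons, decide_eq_true hq, if_pos, ih ht]
      · simp only [List.takeWhile_cons, List.filter_cons, decide_eq_false hq, Bool.false_eq_true,
          if_false]
        symm
        rw [List.filter_eq_nil_iff]
        intro y hy
        have := ha y hy
        simp only [decide_eq_true_eq]
        omega

-- when takeWhile equals filter, dropWhile is the complementary filter
theorem dropWhile_eq_filter_not {α : Type} (p : α → Bool) (l : List α)
    (h : l.takeWhile p = l.filter p) :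
    l.dropWhile p = l.filter (fun x => ! p x) := by
  have hsplit : l.takeWhile p ++ l.dropWhile p = l := List.takeWhile_append_dropWhile
  have hnil : (l.dropWhile p).filter p = [] := by
    have h4 : l.filter p = (l.takeWhile p).filter p ++ (l.dropWhile p).filter p := by
      rw [← List.filter_append, hsplit]
    rw [h, List.filter_filter] at h4
    have h5 : (l.filter fun a => p a && p a) = l.filter p := by
      apply List.filter_congr; intro x _; exact Bool.and_self _
    rw [h5] at h4
    have h6 := congrArg List.length h4
    simp only [List.length_append] at h6
    have hz : ((l.dropWhile p).filter p).length = 0 := by omega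
    exact List.eq_nil_of_length_eq_zero hz
  have hall : ∀ x ∈ l.dropWhile p, p x = false := by
    intro x hx
    by_contra hpx
    have : x ∈ (l.dropWhile p).filter p :=
      List.mem_filter.mpr ⟨hx, by revert hpx; cases p x <;> simp⟩
    simp [hnil] at this
  calc l.dropWhile p = (l.dropWhile p).filter (fun x => ! p x) := by
        rw [List.filter_eq_self.mpr (by intro x hx; simp [hall x hx])]
    _ = l.filter (fun x => ! p x) := by
        have : l.filter (fun x => ! p x)
            = (l.takeWhile p).filter (fun x => ! p x) ++ (l.dropWhile p).filter (fun x => ! p x) := by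
          rw [← List.filter_append, hsplit]
        rw [this, h, List.filter_filter]
        have : (l.filter fun a => (!p a) && p a) = [] := by
          rw [List.filter_eq_nil_iff]; intro a _; cases p a <;> simp
        rw [this, List.nil_append]

-- a descending list is the concatenation of its key-buckets, taken in strictly descending key order
theorem partition_desc {α : Type} (key : α → Int) :
    ∀ (cs : List Int) (l : List α), l.Pairwise (fun a b => key b ≤ key a) →
      cs.Pairwise (fun a b => b < a) → (∀ x ∈ l, key x ∈ cs) →
      l = cs.flatMap (fun c => l.filter (fun x => key x == c)) := by
  intro cs
  induction cs with
  | nil =>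
      intro l _ _ hmem
      cases l with
      | nil => rfl
      | cons a t => exact absurd (hmem a (by simp)) (by simp)
  | cons c cs' ih =>
      intro l hl hcs hmem
      rcases List.pairwise_cons.mp hcs with ⟨hc, hcs'⟩
      have hkeyle : ∀ x ∈ l, key x ≤ c := by
        intro x hx
        rcases List.mem_cons.mp (hmem x hx) with h | h
        · omega
        · have := hc _ h; omega
      have h1 : l.takeWhile (fun x => decide (c ≤ key x)) = l.filter (fun x => decide (c ≤ key x)) :=
        takeWhile_eq_filter_of_desc key c l hl
      have h2 : l.filter (fun x => decide (c ≤ key x)) = l.filter (fun x => key x == c) := by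
        apply List.filter_congr
        intro x hx
        have hle := hkeyle x hx
        by_cases hxc : key x = c
        · rw [hxc]; simp
        · rw [decide_eq_false (show ¬ c ≤ key x by omega)]
          simp [hxc]
      have h3 : l.dropWhile (fun x => decide (c ≤ key x))
          = l.filter (fun x => ! decide (c ≤ key x)) :=
        dropWhile_eq_filter_not _ l h1
      set r := l.dropWhile (fun x => decide (c ≤ key x)) with hr
      have hrlt : ∀ x ∈ r, key x < c := by
        intro x hx
        rw [h3] at hx
        have := (List.mem_filter.mp hx).2
        simp only [Bool.not_eq_true', decide_eq_false_iff_not] at this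
        omega
      have hrpair : r.Pairwise (fun a b => key b ≤ key a) :=
        hl.sublist (List.dropWhile_sublist _)
      have hrmem : ∀ x ∈ r, key x ∈ cs' := by
        intro x hx
        have hxl : x ∈ l := (List.dropWhile_sublist _).subset hx
        rcases List.mem_cons.mp (hmem x hxl) with h | h
        · exact absurd h (by have := hrlt x hx; omega)
        · exact h
      have hIH := ih r hrpair hcs' hrmem
      have hbucket : ∀ c' ∈ cs', l.filter (fun x => key x == c') = r.filter (fun x => key x == c') := by
        intro c' hc'
        have hsplit : l = l.takeWhile (fun x => decide (c ≤ key x)) ++ r :=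
          (List.takeWhile_append_dropWhile).symm
        conv_lhs => rw [hsplit]
        rw [List.filter_append, h1, h2, List.filter_filter]
        have : (l.filter fun a => (key a == c') && (key a == c)) = [] := by
          rw [List.filter_eq_nil_iff]
          intro a _
          have hne : c' ≠ c := by have := hc _ hc'; omega
          have hne' : ¬ c = c' := fun hh => hne hh.symm
          by_cases h : key a = c <;> simp [h, hne']
        rw [this, List.nil_append]
      calc l = l.takeWhile (fun x => decide (c ≤ key x)) ++ r := (List.takeWhile_append_dropWhile).symm
        _ = l.filter (fun x => key x == c) ++ cs'.flatMap (fun c' => r.filter (fun x => key x == c')) := by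
            rw [h1, h2, ← hIH]
        _ = l.filter (fun x => key x == c) ++ cs'.flatMap (fun c' => l.filter (fun x => key x == c')) := by
            congr 1
            exact (List.flatMap_congr (fun c' hc' => (hbucket c' hc').symm))
        _ = (c :: cs').flatMap (fun c' => l.filter (fun x => key x == c')) := by
            rw [List.flatMap_cons]

-- filtering the count list before flattening = filtering the flattened list by count
theorem flatMap_filter_counts {α : Type} (mc : Int) (key : α → Int) (f : Int → List α) :
    ∀ (cs : List Int), (∀ c ∈ cs, ∀ x ∈ f c, key x = c) →
      (cs.filter (fun c => decide (mc ≤ c))).flatMap f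
        = (cs.flatMap f).filter (fun x => decide (mc ≤ key x)) := by
  intro cs
  induction cs with
  | nil => simp
  | cons c cs' ih =>
      intro h
      have hf : ∀ x ∈ f c, key x = c := h c (by simp)
      have ih' := ih (fun c' hc' => h c' (by simp [hc']))
      by_cases hq : mc ≤ c
      · rw [List.filter_cons, if_pos (decide_eq_true hq), List.flatMap_cons, List.flatMap_cons,
          List.filter_append, ih']
        congr 1
        rw [List.filter_eq_self.mpr]
        intro x hx
        simp [hf x hx, hq]
      · rw [List.filter_cons, if_neg (fun hh => hq (of_decide_eq_true hh)), List.flatMap_cons, List.filter_append, ih']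
        rw [show (f c).filter (fun x => decide (mc ≤ key x)) = [] from by
          rw [List.filter_eq_nil_iff]; intro x hx; simp [hf x hx]; omega]
        rw [List.nil_append]

-- B's inner fold over fresh distinct keys appends the enumerated, merged entries
theorem pvBFold_items :
    ∀ (l : List (String × List (String × Int))) (d : PySem.Dict String (List (String × Int))) (i : Int),
      (l.map Prod.fst).Nodup → (∀ kv ∈ l, d.contains kv.1 = false) →
      (l.foldl pvBStep (d, i)).1.items
        = d.items ++ (PySem.List.enumerate l i).map (fun p => (p.2.1, (pvMerge p.1 p.2.2).items)) := by
  intro l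
  induction l with
  | nil => intro d i _ _; simp [PySem.List.enumerate_nil]
  | cons kv t ih =>
      intro d i hnd hfresh
      obtain ⟨k, v⟩ := kv
      have hkfresh : d.contains k = false := hfresh (k, v) List.mem_cons_self
      have hnd' : (t.map Prod.fst).Nodup := (List.nodup_cons.mp hnd).2
      have hknotin : k ∉ t.map Prod.fst := (List.nodup_cons.mp hnd).1
      rw [List.foldl_cons, show pvBStep (d, i) (k, v) = (d.insert k (pvMerge i v).items, i + 1) from rfl,
        ih _ _ hnd' ?_]
      · rw [PySem.Dict.items_insert_of_not_contains d _ hkfresh, PySem.List.enumerate_cons]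
        simp
      · intro kv' hkv'
        rw [PySem.Dict.contains_insert]
        have h1 : d.contains kv'.1 = false := hfresh kv' (List.mem_cons_of_mem _ hkv')
        have h2 : kv'.1 ≠ k := by
          intro hEq
          exact hknotin (hEq ▸ List.mem_map_of_mem hkv')
        simp [h1, h2]

-- B's break loop over the sorted counts is the inner fold over the flattened qualifying buckets
theorem pvBLoop_eq_foldl (mc : Int) (bkt : PySem.Dict Int (List (String × List (String × Int)))) :
    ∀ (cs : List Int) (d : PySem.Dict String (List (String × Int))) (i : Int),
      pvBLoop mc bkt d i cs
        = (((cs.takeWhile (fun c => decide (mc ≤ c))).flatMap (fun c => bkt.getD c [])).foldl pvBStep (d, i)).1 := by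
  intro cs
  induction cs with
  | nil => intro d i; simp [pvBLoop]
  | cons c rest ih =>
      intro d i
      by_cases hlt : c < mc
      · rw [show pvBLoop mc bkt d i (c :: rest) = d from by simp [pvBLoop, hlt]]
        rw [List.takeWhile_cons, decide_eq_false (show ¬ mc ≤ c by omega)]
        simp
      · rw [show pvBLoop mc bkt d i (c :: rest)
            = pvBLoop mc bkt ((bkt.getD c []).foldl pvBStep (d, i)).1 ((bkt.getD c []).foldl pvBStep (d, i)).2 rest from by
          simp [pvBLoop, hlt]]
        rw [ih, List.takeWhile_cons, decide_eq_true (show mc ≤ c by omega)]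
        simp only [if_true, List.flatMap_cons, List.foldl_append]

-- shifting the enumeration start into the merged index
theorem enumerate_map_shift (t : Int) :
    ∀ (l : List (String × List (String × Int))) (s : Int),
      (PySem.List.enumerate l (s + t)).map (fun p => (p.2.1, (pvMerge p.1 p.2.2).items))
        = (PySem.List.enumerate l s).map (fun p => (p.2.1, (pvMerge (p.1 + t) p.2.2).items)) := by
  intro l
  induction l with
  | nil => intro s; simp [PySem.List.enumerate_nil]
  | cons kv rest ih =>
      intro s
      rw [PySem.List.enumerate_cons, PySem.List.enumerate_cons, List.map_cons, List.map_cons,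
        show s + t + 1 = (s + 1) + t from by omega, ih]

-- A's loop, over fresh distinct keys, appends exactly the takeWhile prefix, merged
theorem pvALoop_eq (mc off : Int) (s : List (String × List (String × Int))) :
    ∀ (i : Int) (d : PySem.Dict String (List (String × Int))),
    (s.map Prod.fst).Nodup → (∀ kv ∈ s, d.contains kv.1 = false) →
    (pvALoop mc off d (PySem.List.enumerate s i)).items
      = d.items ++ (PySem.List.enumerate (s.takeWhile (fun kv => decide (mc ≤ pvCount kv.2))) i).map
          (fun p => (p.2.1, (pvMerge (p.1 + off) p.2.2).items)) := by
  induction s with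
  | nil => intro i d _ _; simp [PySem.List.enumerate_nil, pvALoop]
  | cons kv t ih =>
      intro i d hnd hfresh
      obtain ⟨k, v⟩ := kv
      rw [PySem.List.enumerate_cons]
      by_cases hq : mc ≤ pvCount v
      · have hc : ¬ ((pvMerge (i + off) v).getD "count" 0 < mc) := by rw [pvMerge_count]; omega
        rw [show pvALoop mc off d ((i, (k, v)) :: PySem.List.enumerate t (i + 1))
            = pvALoop mc off (d.insert k (pvMerge (i + off) v).items) (PySem.List.enumerate t (i + 1)) from by
          simp only [pvALoop, if_neg hc]]
        have hkfresh : d.contains k = false := hfresh (k, v) List.mem_cons_self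
        have hnd' : (t.map Prod.fst).Nodup := (List.nodup_cons.mp hnd).2
        have hknotin : k ∉ t.map Prod.fst := (List.nodup_cons.mp hnd).1
        rw [ih (i + 1) (d.insert k (pvMerge (i + off) v).items) hnd' ?_]
        · rw [PySem.Dict.items_insert_of_not_contains d _ hkfresh,
            show (k, v) :: t = [(k, v)] ++ t from rfl, List.takeWhile_append]
          simp [decide_eq_true hq, PySem.List.enumerate_cons]
        · intro kv' hkv'
          rw [PySem.Dict.contains_insert]
          have h1 : d.contains kv'.1 = false := hfresh kv' (List.mem_cons_of_mem _ hkv')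
          have h2 : kv'.1 ≠ k := by
            intro hEq
            exact hknotin (hEq ▸ List.mem_map_of_mem hkv')
          simp [h1, h2]
      · have hc : (pvMerge (i + off) v).getD "count" 0 < mc := by rw [pvMerge_count]; omega
        rw [show pvALoop mc off d ((i, (k, v)) :: PySem.List.enumerate t (i + 1)) = d from by
          simp only [pvALoop, if_pos hc]]
        simp [hq, PySem.List.enumerate_nil]

-- the two ports agree on any items list with distinct keys
theorem main_eq (I : List (String × List (String × Int))) (mc off : Int)
    (hnodupI : (I.map Prod.fst).Nodup) :
    (pvALoop mc off PySem.Dict.empty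
        (PySem.List.enumerate (PySem.List.sorted I (fun vv => pvCount vv.2) true) 0)).items
      = (pvBLoop mc (I.foldl (fun b kv => b.modify (pvCount kv.2) [] (fun l => l ++ [kv])) PySem.Dict.empty)
          PySem.Dict.empty off
          (PySem.List.sorted (I.foldl (fun b kv => b.modify (pvCount kv.2) [] (fun l => l ++ [kv])) PySem.Dict.empty).keys (fun c => c) true)).items := by
  set S := PySem.List.sorted I (fun vv => pvCount vv.2) true with hS
  set bkt := I.foldl (fun b kv => b.modify (pvCount kv.2) [] (fun l => l ++ [kv])) PySem.Dict.empty with hbkt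
  set counts := PySem.List.sorted bkt.keys (fun c => c) true with hcounts
  -- facts about S
  have hSnodup : (S.map Prod.fst).Nodup :=
    (((PySem.List.sorted_perm I (fun vv => pvCount vv.2) true).map Prod.fst).nodup_iff).mpr hnodupI
  have hSdesc : S.Pairwise (fun a b => pvCount b.2 ≤ pvCount a.2) :=
    PySem.List.sorted_pairwise_rev I (fun vv => pvCount vv.2)
  -- facts about the buckets
  have hbget : ∀ c, bkt.getD c [] = I.filter (fun kv => pvCount kv.2 == c) := by
    intro c
    have hfold : bkt = (I.map (fun kv : String × List (String × Int) => (pvCount kv.2, kv))).foldl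
        (fun d p => d.modify p.1 [] (fun l => l ++ [p.2])) PySem.Dict.empty := by
      rw [List.foldl_map, hbkt]
    rw [hfold, PySem.Dict.getD_foldl_modify_append]
    simp [List.filter_map, Function.comp_def]
  have hkeys : bkt.keys = PySem.Set.ofList (I.map (fun kv => pvCount kv.2)) := by
    rw [hbkt]
    simpa using PySem.Dict.keys_foldl_modify_key I (fun kv => pvCount kv.2) []
      (fun _ kv => fun l => l ++ [kv]) PySem.Dict.empty
  have hknodup : bkt.keys.Nodup := by
    rw [hbkt]
    exact PySem.Dict.nodup_keys_foldl_modify_key I (fun kv => pvCount kv.2) []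
      (fun _ kv => fun l => l ++ [kv]) PySem.Dict.empty (by simp [pysem])
  -- facts about the sorted distinct counts
  have hcdesc : counts.Pairwise (fun a b => b ≤ a) :=
    PySem.List.sorted_pairwise_rev bkt.keys (fun c => c)
  have hcnodup : counts.Nodup :=
    ((PySem.List.sorted_perm bkt.keys (fun c => c) true).nodup_iff).mpr hknodup
  have hcstrict : counts.Pairwise (fun a b => b < a) := by
    have := hcdesc.and hcnodup
    exact this.imp (by intro a b h; rcases h with ⟨h1, h2⟩; omega)
  have hmemS : ∀ x ∈ S, pvCount x.2 ∈ counts := by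
    intro x hx
    have hxI : x ∈ I := (PySem.List.mem_sorted I (fun vv => pvCount vv.2) true x).mp hx
    rw [hcounts, PySem.List.mem_sorted, hkeys, PySem.Set.mem_ofList]
    exact List.mem_map_of_mem hxI
  -- S is the concatenation of its buckets in descending count order
  have hSfil : ∀ c, S.filter (fun x => pvCount x.2 == c) = I.filter (fun kv => pvCount kv.2 == c) := by
    intro c
    rw [hS, sorted_filter_comm (fun vv => pvCount vv.2) (fun x => pvCount x.2 == c) I]
    apply PySem.List.sorted_rev_eq_self_of_pairwise
    apply List.pairwise_of_forall_mem_list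
    intro a ha b hb
    have ha' := (List.mem_filter.mp ha).2
    have hb' := (List.mem_filter.mp hb).2
    simp only [beq_iff_eq] at ha' hb'
    omega
  have hpart : S = counts.flatMap (fun c => S.filter (fun x => pvCount x.2 == c)) :=
    partition_desc (fun kv => pvCount kv.2) counts S hSdesc hcstrict hmemS
  have hGS : counts.flatMap (fun c => bkt.getD c []) = S := by
    rw [List.flatMap_congr (fun c _ => (hbget c).trans (hSfil c).symm)]
    exact hpart.symm
  -- rewrite B's loop as the fold over the flattened qualifying list
  rw [pvBLoop_eq_foldl mc bkt counts PySem.Dict.empty off]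
  have hctw : counts.takeWhile (fun c => decide (mc ≤ c)) = counts.filter (fun c => decide (mc ≤ c)) :=
    takeWhile_eq_filter_of_desc (fun c => c) mc counts hcdesc
  have hbelow : ∀ c ∈ counts, ∀ x ∈ bkt.getD c [], pvCount x.2 = c := by
    intro c _ x hx
    rw [hbget c] at hx
    have := (List.mem_filter.mp hx).2
    simpa using this
  have hG : (counts.takeWhile (fun c => decide (mc ≤ c))).flatMap (fun c => bkt.getD c [])
      = S.filter (fun kv => decide (mc ≤ pvCount kv.2)) := by
    rw [hctw, flatMap_filter_counts mc (fun kv => pvCount kv.2) (fun c => bkt.getD c []) counts hbelow, hGS]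
  rw [hG]
  -- rewrite A's loop as the map over the enumerated takeWhile prefix
  rw [pvALoop_eq mc off S 0 PySem.Dict.empty hSnodup (fun kv _ => by simp [pysem]),
    takeWhile_eq_filter_of_desc (fun kv => pvCount kv.2) mc S hSdesc]
  set F := S.filter (fun kv => decide (mc ≤ pvCount kv.2)) with hF
  have hsub : F.Sublist S := by rw [hF]; exact List.filter_sublist
  have hFnodup : (F.map Prod.fst).Nodup := hSnodup.sublist (hsub.map Prod.fst)
  rw [pvBFold_items F PySem.Dict.empty off hFnodup (fun kv _ => by simp [pysem])]
  have hshift := enumerate_map_shift off F 0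
  rw [show (0 : Int) + off = off from by omega] at hshift
  simp only [PySem.Dict.empty, List.nil_append]
  exact hshift.symm

-- ===== VERDICT (by name: the statement is the Claim_ definition above) =====
theorem build_index_by_count_spec : Claim_equal_build_index_by_count := by
  intro cd mc off _ _
  unfold Spec_build_index_by_count build_index_by_count build_index_by_count_alt
  exact main_eq (PySem.Dict.ofList cd).items mc off
    (by simpa [PySem.Dict.keys] using PySem.Dict.nodup_keys_ofList cd)
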